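-- pv_equiv track=rewrite | github.com/Szampan/codewars | number of integer partitions slow.py | completed_partition
-- ===== SOURCE A (Python) =====
-- def completed_partition(lst, n):
--     new_lst = lst
--     while sum(new_lst) != n:
--         if n - sum(new_lst) >= min(new_lst):
--             new_lst.append(min(new_lst))
--         else:
--             new_lst.append(n-sum(new_lst))
--     return new_lst
-- ===== SOURCE B (Python) =====
-- def completed_partition(lst, n):
--     # Pads lst in place (like A) with copies of min(lst) and one remainder,
--     # computed in closed form instead of re-summing the list each iteration.
--     r = n - sum(lst)
--     if r == 0:
--         return lst
--     m = min(lst)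
--     if r < m:
--         lst.append(r)
--         return lst
--     q, rem = divmod(r, m)
--     lst.extend([m] * q)
--     if rem:
--         lst.append(rem)
--     return lst
-- ===== Notes on version B (the rewrite author's own statement) =====
-- stated objective: faster
-- what changed: B replaces A's loop that re-sums and re-mins the whole list per appended element by one divmod, extending the list once; intended as faster (asymptotic) - in a timing run A timed out at n=16 where B returned, so no ratio could be measured.
import Mathlib
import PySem

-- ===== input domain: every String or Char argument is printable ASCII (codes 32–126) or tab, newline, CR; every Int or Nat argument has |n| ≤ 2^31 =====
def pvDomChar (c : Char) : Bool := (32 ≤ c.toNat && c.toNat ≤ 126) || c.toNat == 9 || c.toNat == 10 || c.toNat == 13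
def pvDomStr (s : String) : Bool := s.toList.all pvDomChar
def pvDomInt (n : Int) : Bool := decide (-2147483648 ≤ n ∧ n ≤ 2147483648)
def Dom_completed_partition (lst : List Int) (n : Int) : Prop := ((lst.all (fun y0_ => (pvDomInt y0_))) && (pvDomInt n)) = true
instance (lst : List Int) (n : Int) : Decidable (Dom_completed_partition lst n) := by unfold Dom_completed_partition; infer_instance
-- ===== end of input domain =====

-- B pads lst with copies of min(lst) and one remainder computed by a single divmod,
-- instead of A's loop that re-sums and re-mins the growing list each iteration.
-- Both Pythons mutate lst in place identically; the equivalence is about the return value.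

-- Python's min(xs) (raises on []; Pre_ keeps the loop away from that case)
def pyMin (xs : List Int) : Int :=
  match PySem.List.min? xs (fun x => x) with
  | some v => v
  | none => 0

-- ===== PORT A =====
-- the while loop, with enough fuel for every input admitted by Pre_
def cpLoop (fuel : Nat) (n : Int) (acc : List Int) : List Int :=
  match fuel with
  | 0 => acc
  | f + 1 =>
    if acc.sum ≠ n then
      if n - acc.sum ≥ pyMin acc then cpLoop f n (acc ++ [pyMin acc])
      else cpLoop f n (acc ++ [n - acc.sum])
    else acc

def completed_partition (lst : List Int) (n : Int) : List Int :=
  cpLoop ((n - lst.sum).toNat + 2) n lst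

-- ===== PORT B =====
def completed_partition_alt (lst : List Int) (n : Int) : List Int :=
  let r := n - lst.sum
  if r = 0 then lst
  else
    let m := pyMin lst
    if r < m then lst ++ [r]
    else
      let filled := lst ++ List.replicate (PySem.Int.floordiv r m).toNat m
      let rem := PySem.Int.mod r m
      if rem ≠ 0 then filled ++ [rem] else filled

-- ===== PRECONDITION & SPEC =====
-- Pre_ admits exactly the inputs where A returns: otherwise A raises ValueError
-- (min of empty list, when lst = [] and sum ≠ n) or loops forever (min(lst) ≤ 0
-- with at least min(lst) still missing).
def Pre_completed_partition (lst : List Int) (n : Int) : Prop :=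
  lst.sum = n ∨ (lst ≠ [] ∧ (n - lst.sum < pyMin lst ∨ 0 < pyMin lst))
instance (lst : List Int) (n : Int) : Decidable (Pre_completed_partition lst n) := by
  unfold Pre_completed_partition; infer_instance

def pvWitness_completed_partition : List Int × Int := ([2, 3], 9)

def Spec_completed_partition (lst : List Int) (n : Int) (out : List Int) : Prop := out = completed_partition_alt lst n
instance (lst : List Int) (n : Int) (out : List Int) : Decidable (Spec_completed_partition lst n out) := by unfold Spec_completed_partition; infer_instance

-- ===== CLAIM (what is proved, stated in full; the proofs are below) =====
def Claim_equal_completed_partition : Prop := ∀ (lst : List Int) (n : Int), Dom_completed_partition lst n → Pre_completed_partition lst n → Spec_completed_partition lst n (completed_partition lst n)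

-- ===== LEMMAS AND PROOFS =====

lemma pyMin_cons (x : Int) (t : List Int) : pyMin (x :: t) = t.foldl min x := by
  simp [pyMin, PySem.List.min?_id_cons]

lemma pyMin_append_self (xs : List Int) (hne : xs ≠ []) :
    pyMin (xs ++ [pyMin xs]) = pyMin xs := by
  cases xs with
  | nil => exact absurd rfl hne
  | cons x t =>
    simp [List.cons_append, pyMin_cons, List.foldl_append]

lemma sum_append_one (xs : List Int) (v : Int) : (xs ++ [v]).sum = xs.sum + v := by
  simp

-- the filling loop: with min m > 0 it appends m exactly k times, then the remainder (if any)
lemma cpLoop_run (m : Int) (hm : 0 < m) :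
    ∀ (k : Nat) (xs : List Int) (f : Nat) (n : Int), xs ≠ [] → pyMin xs = m →
      0 ≤ n - xs.sum - k * m → n - xs.sum - k * m < m → k + 2 ≤ f →
      cpLoop f n xs =
        (xs ++ List.replicate k m) ++
          (if n - xs.sum - k * m ≠ 0 then [n - xs.sum - k * m] else []) := by
  intro k
  induction k with
  | zero =>
    intro xs f n hne hmin hlo hhi hf
    obtain ⟨f', rfl⟩ : ∃ f', f = f' + 2 := ⟨f - 2, by omega⟩
    by_cases hz : n - xs.sum = 0
    · simp [cpLoop, show xs.sum = n by omega]
    · have hs : xs.sum ≠ n := by omega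
      have hlt : ¬ (n - xs.sum ≥ pyMin xs) := by rw [hmin]; omega
      have hs2 : (xs ++ [n - xs.sum]).sum = n := by rw [sum_append_one]; omega
      simp only [cpLoop, if_neg hlt]
      simp [hs2, hs, hz]
  | succ k ih =>
    intro xs f n hne hmin hlo hhi hf
    obtain ⟨f', rfl⟩ : ∃ f', f = f' + 1 := ⟨f - 1, by omega⟩
    have hr : n - xs.sum ≥ pyMin xs := by
      rw [hmin]; push_cast at hlo ⊢; nlinarith
    have hs : xs.sum ≠ n := by
      intro h; rw [h] at hlo; push_cast at hlo; nlinarith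
    have step : cpLoop (f' + 1) n xs = cpLoop f' n (xs ++ [pyMin xs]) := by
      simp [cpLoop, hs, hr]
    rw [step, hmin]
    have hpa : pyMin (xs ++ [m]) = m := by rw [← hmin]; exact pyMin_append_self xs hne
    have hrec := ih (xs ++ [m]) f' n (by simp) hpa
      (by rw [sum_append_one]; push_cast at hlo ⊢; linarith)
      (by rw [sum_append_one]; push_cast at hhi ⊢; linarith)
      (by omega)
    rw [hrec, sum_append_one]
    have harith : n - (xs.sum + m) - (k : Int) * m = n - xs.sum - ((k : Nat) + 1 : Nat) * m := by
      push_cast; ring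
    rw [harith]
    simp [List.replicate_succ, List.append_assoc]

-- B's value in the filling case, written out
lemma alt_fill (lst : List Int) (n : Int) (hz : ¬ n - lst.sum = 0)
    (hlt : ¬ n - lst.sum < pyMin lst) :
    completed_partition_alt lst n =
      (lst ++ List.replicate (PySem.Int.floordiv (n - lst.sum) (pyMin lst)).toNat (pyMin lst)) ++
        (if PySem.Int.mod (n - lst.sum) (pyMin lst) ≠ 0
          then [PySem.Int.mod (n - lst.sum) (pyMin lst)] else []) := by
  simp only [completed_partition_alt]
  rw [if_neg hz, if_neg hlt]
  split <;> simp

-- ===== VERDICT (by name: the statement is the Claim_ definition above) =====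
theorem completed_partition_spec : Claim_equal_completed_partition := by
  intro lst n _ hpre
  unfold Spec_completed_partition
  by_cases hz : n - lst.sum = 0
  · have hs : lst.sum = n := by omega
    simp [completed_partition, completed_partition_alt, cpLoop, hs]
  · have hne : lst ≠ [] := by
      rcases hpre with h | ⟨h, _⟩
      · omega
      · exact h
    by_cases hlt : n - lst.sum < pyMin lst
    · -- one remainder append, then done
      have hs : lst.sum ≠ n := by omega
      have hnge : ¬ (n - lst.sum ≥ pyMin lst) := by omega
      have hs2 : (lst ++ [n - lst.sum]).sum = n := by rw [sum_append_one]; omega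
      have hf : (n - lst.sum).toNat + 2 = (n - lst.sum).toNat + 1 + 1 := by omega
      rw [completed_partition, hf]
      simp only [cpLoop, if_pos (show lst.sum ≠ n from hs), if_neg hnge]
      simp [completed_partition_alt, hs2, hz, hlt]
    · -- filling case: pyMin lst > 0 from Pre_
      have hmpos : 0 < pyMin lst := by
        rcases hpre with h | ⟨_, h | h⟩
        · omega
        · omega
        · exact h
      have hdm := PySem.Int.floordiv_mul_add_mod (n - lst.sum) (pyMin lst)
      have hrem0 := PySem.Int.mod_nonneg (n - lst.sum) hmpos
      have hremm := PySem.Int.mod_lt (n - lst.sum) hmpos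
      have hq1 : 1 ≤ PySem.Int.floordiv (n - lst.sum) (pyMin lst) := by
        rw [PySem.Int.le_floordiv_iff_mul_le hmpos]; omega
      have hqt : ((PySem.Int.floordiv (n - lst.sum) (pyMin lst)).toNat : Int)
          = PySem.Int.floordiv (n - lst.sum) (pyMin lst) :=
        Int.toNat_of_nonneg (by omega)
      have hqler : PySem.Int.floordiv (n - lst.sum) (pyMin lst) ≤ n - lst.sum := by nlinarith
      have hrun := cpLoop_run (pyMin lst) hmpos
        (PySem.Int.floordiv (n - lst.sum) (pyMin lst)).toNat lst ((n - lst.sum).toNat + 2) n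
        hne rfl (by rw [hqt]; linarith) (by rw [hqt]; linarith) (by omega)
      have hval : n - lst.sum
          - ((PySem.Int.floordiv (n - lst.sum) (pyMin lst)).toNat : Int) * pyMin lst
          = PySem.Int.mod (n - lst.sum) (pyMin lst) := by rw [hqt]; linarith
      rw [hval] at hrun
      rw [completed_partition, alt_fill lst n hz hlt, hrun]
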